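-- pv_equiv track=rewrite | github.com/whyman903/compile-obsidian | compile/verify.py | _has_empty_section
-- ===== SOURCE A (Python) =====
-- def _has_empty_section(body: str) -> bool:
--     lines = body.splitlines()
--     section_start: int | None = None
--
--     def has_payload(start: int, end: int) -> bool:
--         for line in lines[start:end]:
--             stripped = line.strip()
--             if not stripped:
--                 continue
--             if stripped.startswith("<!--") and stripped.endswith("-->"):
--                 continue
--             return True
--         return False
--
--     for idx, line in enumerate(lines):
--         if line.startswith("## "):
--             if section_start is not None and not has_payload(section_start + 1, idx):
--                 return True
--             section_start = idx
--
--     if section_start is not None and not has_payload(section_start + 1, len(lines)):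
--         return True
--
--     return False
-- ===== SOURCE B (Python) =====
-- def _has_empty_section(body: str) -> bool:
--     in_section = False
--     seen_payload = False
--     for line in body.splitlines():
--         if line.startswith("## "):
--             if in_section and not seen_payload:
--                 return True
--             in_section = True
--             seen_payload = False
--         elif in_section and not seen_payload:
--             stripped = line.strip()
--             if stripped and not (stripped.startswith("<!--") and stripped.endswith("-->")):
--                 seen_payload = True
--     return in_section and not seen_payload
-- ===== Notes on version B (the rewrite author's own statement) =====
-- stated objective: simpler
-- what changed: Replaced the saved header index plus the re-scanning has_payload slice helper by a single forward pass maintaining two booleans (in_section, seen_payload), so no line is ever visited twice.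
import Mathlib
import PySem

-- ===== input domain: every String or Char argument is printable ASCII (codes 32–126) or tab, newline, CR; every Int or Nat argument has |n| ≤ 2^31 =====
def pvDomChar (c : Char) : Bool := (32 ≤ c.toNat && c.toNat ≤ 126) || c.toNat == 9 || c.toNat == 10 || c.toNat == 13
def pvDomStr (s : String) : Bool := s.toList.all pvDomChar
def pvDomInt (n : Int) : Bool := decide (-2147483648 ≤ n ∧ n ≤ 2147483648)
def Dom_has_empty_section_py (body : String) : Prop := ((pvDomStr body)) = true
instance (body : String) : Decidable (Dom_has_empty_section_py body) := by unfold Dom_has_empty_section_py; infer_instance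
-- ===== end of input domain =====

-- B replaces A's saved header index + re-scanning slice helper by a single pass keeping two
-- booleans (in_section / seen_payload); objective: simpler (same O(n) cost, no re-scans).

-- ===== PORT A =====
-- inner helper has_payload's loop over lines[start:end]
def pvHasPayloadGo : List String → Bool
  | [] => false
  | line :: rest =>
    let stripped := PySem.Str.strip line
    if stripped = "" then pvHasPayloadGo rest
    else if PySem.Str.startswith stripped "<!--" && PySem.Str.endswith stripped "-->" then
      pvHasPayloadGo rest
    else true

def pvHasPayloadA (lines : List String) (start stop : Int) : Bool :=
  pvHasPayloadGo (PySem.List.slice lines (some start) (some stop))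

-- the main 'for idx, line in enumerate(lines)' loop, state = section_start; the [] case is the
-- trailing 'if section_start is not None … return True / return False' after the loop
def pvLoopA (lines : List String) : List (Int × String) → Option Int → Bool
  | [], st =>
    match st with
    | some s => !pvHasPayloadA lines (s + 1) (lines.length : Int)
    | none => false
  | (idx, line) :: rest, st =>
    if PySem.Str.startswith line "## " then
      match st with
      | some s =>
        if !pvHasPayloadA lines (s + 1) idx then true
        else pvLoopA lines rest (some idx)
      | none => pvLoopA lines rest (some idx)
    else pvLoopA lines rest st

def has_empty_section_py (body : String) : Bool :=
  let lines := PySem.Str.splitlines body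
  pvLoopA lines (PySem.List.enumerate lines 0) none

-- ===== PORT B =====
def pvIsPayload (line : String) : Bool :=
  let stripped := PySem.Str.strip line
  stripped != "" && !(PySem.Str.startswith stripped "<!--" && PySem.Str.endswith stripped "-->")

def pvLoopB : List String → Bool → Bool → Bool
  | [], inSection, seenPayload => inSection && !seenPayload
  | line :: rest, inSection, seenPayload =>
    if PySem.Str.startswith line "## " then
      if inSection && !seenPayload then true
      else pvLoopB rest true false
    else if inSection && !seenPayload then
      pvLoopB rest inSection (pvIsPayload line)
    else pvLoopB rest inSection seenPayload

def has_empty_section_py_alt (body : String) : Bool :=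
  pvLoopB (PySem.Str.splitlines body) false false

-- ===== PRECONDITION & SPEC =====
def Spec_has_empty_section_py (body : String) (out : Bool) : Prop := out = has_empty_section_py_alt body
instance (body : String) (out : Bool) : Decidable (Spec_has_empty_section_py body out) := by unfold Spec_has_empty_section_py; infer_instance

-- ===== CLAIM (what is proved, stated in full; the proofs are below) =====
def Claim_equal_has_empty_section_py : Prop := ∀ (body : String), Dom_has_empty_section_py body → Spec_has_empty_section_py body (has_empty_section_py body)

-- ===== LEMMAS AND PROOFS =====

theorem pvHasPayloadGo_eq_any (l : List String) : pvHasPayloadGo l = l.any pvIsPayload := by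
  induction l with
  | nil => rfl
  | cons line rest ih =>
    simp only [pvHasPayloadGo, pvIsPayload, List.any_cons]
    by_cases h : PySem.Str.strip line = ""
    · simp [h, ih]
    · rw [if_neg h]
      by_cases hc : (PySem.Str.startswith (PySem.Str.strip line) "<!--"
          && PySem.Str.endswith (PySem.Str.strip line) "-->") = true
      · rw [if_pos hc, ih, hc]
        simp
      · have hc' : (PySem.Str.startswith (PySem.Str.strip line) "<!--"
            && PySem.Str.endswith (PySem.Str.strip line) "-->") = false := by
          revert hc; cases (PySem.Str.startswith (PySem.Str.strip line) "<!--"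
            && PySem.Str.endswith (PySem.Str.strip line) "-->") <;> simp
        rw [if_neg hc, hc']
        simp [bne_iff_ne, h]

-- seen_payload in B equals "some payload line strictly between the header (index s) and position k"
def pvSeen (lines : List String) (s k : Nat) : Bool :=
  ((lines.drop (s + 1)).take (k - s - 1)).any pvIsPayload

theorem pvSeen_step (lines : List String) (s k : Nat) (line : String) (rest : List String)
    (hdrop : lines.drop k = line :: rest) (hs : s < k) :
    pvSeen lines s (k + 1) = (pvSeen lines s k || pvIsPayload line) := by
  have hk : lines[k]? = some line := by
    have h0 : (List.drop k lines)[0]? = lines[k + 0]? := List.getElem?_drop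
    rw [hdrop] at h0
    simpa using h0.symm
  have h1 : k + 1 - s - 1 = (k - s - 1) + 1 := by omega
  have h2 : (lines.drop (s + 1))[k - s - 1]? = some line := by
    rw [List.getElem?_drop]
    have h3 : s + 1 + (k - s - 1) = k := by omega
    rw [h3, hk]
  simp [pvSeen, h1, List.take_add_one, h2]

theorem pvHasPayloadA_eq_seen (lines : List String) (s k : Nat) :
    pvHasPayloadA lines ((s : Int) + 1) (k : Int) = pvSeen lines s k := by
  have h : ((s : Int) + 1) = ((s + 1 : Nat) : Int) := by push_cast; ring
  rw [pvHasPayloadA, h, PySem.List.slice_natCast, pvHasPayloadGo_eq_any, pvSeen]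
  have h4 : k - (s + 1) = k - s - 1 := by omega
  rw [h4]

theorem pvLoop_key (rest : List String) : ∀ (k : Nat) (lines : List String),
    lines.drop k = rest →
    (∀ (s : Nat), s < k →
       pvLoopA lines (PySem.List.enumerate rest (k : Int)) (some (s : Int))
         = pvLoopB rest true (pvSeen lines s k))
    ∧ pvLoopA lines (PySem.List.enumerate rest (k : Int)) none = pvLoopB rest false false := by
  induction rest with
  | nil =>
    intro k lines hdrop
    have hlen : lines.length ≤ k := List.drop_eq_nil_iff.mp hdrop
    constructor
    · intro s hs
      simp only [PySem.List.enumerate_nil, pvLoopA, pvLoopB, Bool.true_and]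
      rw [pvHasPayloadA_eq_seen lines s lines.length]
      have h2 : pvSeen lines s lines.length = pvSeen lines s k := by
        unfold pvSeen
        rw [List.take_of_length_le (by simp; omega), List.take_of_length_le (by simp; omega)]
      rw [h2]
    · simp [PySem.List.enumerate_nil, pvLoopA, pvLoopB]
  | cons line rest' ih =>
    intro k lines hdrop
    have hdrop' : lines.drop (k + 1) = rest' := by
      have h : lines.drop (k + 1) = (lines.drop k).drop 1 := by rw [List.drop_drop]
      rw [h, hdrop]
      rfl
    obtain ⟨ihs, ihn⟩ := ih (k + 1) lines hdrop'
    have hcast : (k : Int) + 1 = ((k + 1 : Nat) : Int) := by push_cast; ring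
    have hreset : pvSeen lines k (k + 1) = false := by simp [pvSeen]
    constructor
    · intro s hs
      rw [PySem.List.enumerate_cons]
      by_cases hhdr : PySem.Str.startswith line "## " = true
      · simp only [pvLoopA, pvLoopB, hhdr, if_true, Bool.true_and]
        rw [pvHasPayloadA_eq_seen lines s k]
        by_cases hsee : pvSeen lines s k = true
        · rw [hsee]
          simp only [Bool.not_true, Bool.false_eq_true, if_false]
          rw [hcast, ihs k (by omega), hreset]
        · have hsee' : pvSeen lines s k = false := by
            revert hsee; cases (pvSeen lines s k) <;> simp
          rw [hsee']
          simp
      · have hhdr' : PySem.Str.startswith line "## " = false := by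
          revert hhdr; cases (PySem.Str.startswith line "## ") <;> simp
        simp only [pvLoopA, pvLoopB, hhdr', Bool.false_eq_true, if_false, Bool.true_and]
        rw [hcast, ihs s (by omega),
          pvSeen_step lines s k line rest' hdrop hs]
        by_cases hsee : pvSeen lines s k = true
        · rw [hsee]
          simp
        · have hsee' : pvSeen lines s k = false := by
            revert hsee; cases (pvSeen lines s k) <;> simp
          rw [hsee']
          simp
    · rw [PySem.List.enumerate_cons]
      by_cases hhdr : PySem.Str.startswith line "## " = true
      · simp only [pvLoopA, pvLoopB, hhdr, if_true, Bool.false_and, Bool.not_false,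
          Bool.false_eq_true, if_false]
        rw [hcast, ihs k (by omega), hreset]
      · have hhdr' : PySem.Str.startswith line "## " = false := by
          revert hhdr; cases (PySem.Str.startswith line "## ") <;> simp
        simp only [pvLoopA, pvLoopB, hhdr', Bool.false_eq_true, if_false, Bool.false_and]
        rw [hcast, ihn]

-- ===== VERDICT (by name: the statement is the Claim_ definition above) =====
theorem has_empty_section_py_spec : Claim_equal_has_empty_section_py := by
  intro body _
  unfold Spec_has_empty_section_py has_empty_section_py has_empty_section_py_alt
  have h := (pvLoop_key (PySem.Str.splitlines body) 0 (PySem.Str.splitlines body) (by simp)).2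
  simpa using h
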